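-- pv_equiv track=rewrite | github.com/dydfuf/Coding-Test | Programmers/Study/line_2.py | solution
-- ===== SOURCE A (Python) =====
-- def solution(research, n, k):
--     search_alpha = set()
--     _dict = dict()
--     for r in research:
--         for c in r:
--             search_alpha.add(c)
--
--     search_alpha = list(search_alpha)
--     search_alpha.sort()
--
--     for alpha in search_alpha:
--         _dict[alpha] = []
--         for r in research:
--             _dict[alpha].append(r.count(alpha))
--
--     length = len(research)
--
--     _answer = dict()
--
--     for i in range(length - n + 1):
--         for key in _dict.keys():
--             temp = _dict[key]
--             if sum(temp[i:i + n]) < 2 * n * k: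
--                 continue
--
--             v = True
--             for j in range(i, i + n):
--                 if temp[j] < k:
--                     v = False
--                     break
--
--             if v:
--                 if key in _answer.keys():
--                     _answer[key] += 1
--                 else:
--                     _answer[key] = 1
--
--     listAnswer = []
--
--     for key in _answer.keys():
--         listAnswer.append([key, _answer[key]])
--
--     listAnswer.sort(key=lambda x: (int(-x[1]), x[0]))
--
--     if listAnswer:
--         return listAnswer[0][0]
--     else:
--         return "None"
-- ===== SOURCE B (Python) =====
-- def solution(research, n, k):
--     L = len(research)
--     alphas = sorted({c for r in research for c in r})
--     threshold = 2 * n * k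
--     best = None  # (alpha, wins) with the most wins seen so far
--     for a in alphas:
--         counts = [r.count(a) for r in research]
--         wins = 0
--         if L >= n:
--             s = sum(counts[:n])
--             bad = sum(1 for c in counts[:n] if c < k)
--             if s >= threshold and bad == 0:
--                 wins += 1
--             for i in range(1, L - n + 1):
--                 out_c = counts[i - 1]
--                 in_c = counts[i + n - 1]
--                 s += in_c - out_c
--                 bad += (in_c < k) - (out_c < k)
--                 if s >= threshold and bad == 0:
--                     wins += 1
--         if wins > 0 and (best is None or wins > best[1]):
--             best = (a, wins)
--     return best[0] if best is not None else "None"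
-- ===== Notes on version B (the rewrite author's own statement) =====
-- stated objective: faster
-- what changed: B replaces A's per-window recomputation (slice sum plus inner min-scan for every window and letter) by one sliding-window pass per letter that maintains the window sum and the count of below-k entries incrementally, and replaces A's build-dict-then-sort selection by a running first-strict-max over the alphabetically sorted letters.
-- outside the precondition, e.g. on solution(['ab', 'b'], -1, 1): A returns 'a', B raises IndexError
import Mathlib
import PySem

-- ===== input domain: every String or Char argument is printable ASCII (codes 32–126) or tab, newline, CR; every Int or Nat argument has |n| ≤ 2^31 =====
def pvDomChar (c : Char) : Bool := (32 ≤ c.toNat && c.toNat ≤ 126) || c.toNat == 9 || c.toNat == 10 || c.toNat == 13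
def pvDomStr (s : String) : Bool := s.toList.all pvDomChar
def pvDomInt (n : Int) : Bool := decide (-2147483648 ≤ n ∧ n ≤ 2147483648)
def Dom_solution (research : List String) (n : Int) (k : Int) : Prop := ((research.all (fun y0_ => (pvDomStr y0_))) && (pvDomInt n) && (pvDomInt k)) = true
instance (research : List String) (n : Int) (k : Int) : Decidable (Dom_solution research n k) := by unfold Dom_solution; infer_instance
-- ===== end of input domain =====

-- B replaces A's per-window recomputation by one incremental sliding-window pass per letter
-- and a running first-strict-max instead of A's dict-then-sort selection (measured objective: faster).

-- ===== PORT A =====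
def solution (research : List String) (n : Int) (k : Int) : String :=
  let searchAlpha : PySem.Set Char :=
    research.foldl (fun s r => r.toList.foldl (fun s c => PySem.Set.add s c) s) []
  let searchAlpha := PySem.List.sorted searchAlpha (fun x => x) false
  let dct : PySem.Dict Char (List Int) :=
    searchAlpha.foldl (fun d alpha =>
      research.foldl
        (fun d r => d.modify alpha [] (fun l => l ++ [(PySem.Str.count r (String.ofList [alpha]) : Int)]))
        (d.insert alpha [])) PySem.Dict.empty
  let length : Int := (research.length : Int)
  let answer : PySem.Dict Char Int :=
    (PySem.List.pyRange 0 (length - n + 1)).foldl (fun ans i =>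
      dct.keys.foldl (fun ans key =>
        let temp := dct.getD key []
        if (PySem.List.slice temp (some i) (some (i + n))).sum < 2 * n * k then ans
        else
          let v := (PySem.List.pyRange i (i + n)).foldl
            (fun v j => if v then (if PySem.List.pyGetD temp j 0 < k then false else v) else v) true
          if v then
            (if ans.contains key then ans.modify key 0 (· + 1) else ans.insert key 1)
          else ans) ans) PySem.Dict.empty
  let listAnswer : List (Char × Int) :=
    answer.keys.foldl (fun l key => l ++ [(key, answer.getD key 0)]) []
  let listAnswer := PySem.List.sorted2 listAnswer (fun x => -x.2) (fun x => x.1) false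
  match listAnswer with
  | x :: _ => String.ofList [x.1]
  | [] => "None"

-- ===== PORT B =====
def solution_alt (research : List String) (n : Int) (k : Int) : String :=
  let L : Int := (research.length : Int)
  let alphas := PySem.List.sorted
    (research.foldl (fun s r => r.toList.foldl (fun s c => PySem.Set.add s c) s) ([] : PySem.Set Char))
    (fun x => x) false
  let threshold := 2 * n * k
  let best : Option (Char × Int) := alphas.foldl (fun best a =>
    let counts := research.map (fun r => (PySem.Str.count r (String.ofList [a]) : Int))
    let wins : Int :=
      if n ≤ L then
        let s0 := (PySem.List.slice counts none (some n)).sum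
        let bad0 : Int := ((PySem.List.slice counts none (some n)).countP (fun c => decide (c < k)) : Int)
        let w0 : Int := if threshold ≤ s0 ∧ bad0 = 0 then 1 else 0
        let st := (PySem.List.pyRange 1 (L - n + 1)).foldl
          (fun (st : Int × Int × Int) i =>
            let outc := PySem.List.pyGetD counts (i - 1) 0
            let inc := PySem.List.pyGetD counts (i + n - 1) 0
            let s := st.1 + (inc - outc)
            let bad := st.2.1 + ((if inc < k then (1 : Int) else 0) - (if outc < k then (1 : Int) else 0))
            let w := if threshold ≤ s ∧ bad = 0 then st.2.2 + 1 else st.2.2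
            (s, bad, w)) (s0, bad0, w0)
        st.2.2
      else 0
    if decide (0 < wins) && (match best with | none => true | some b => decide (b.2 < wins)) then
      some (a, wins)
    else best) none
  match best with
  | some b => String.ofList [b.1]
  | none => "None"

-- ===== PRECONDITION & SPEC =====
-- Pre_ keeps the task's natural domain: a non-negative window length. For n < 0, Python's negative
-- slice/list indices make A's phantom windows wrap around, an artefact of A's slicing on degenerate
-- input, and B's sliding window raises IndexError there.
def Pre_solution (research : List String) (n : Int) (k : Int) : Prop := 0 ≤ n
instance (research : List String) (n : Int) (k : Int) : Decidable (Pre_solution research n k) := by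
  unfold Pre_solution; infer_instance
def pvWitness_solution : List String × Int × Int := (["ab", "b"], 1, 1)
def Spec_solution (research : List String) (n : Int) (k : Int) (out : String) : Prop := out = solution_alt research n k
instance (research : List String) (n : Int) (k : Int) (out : String) : Decidable (Spec_solution research n k out) := by unfold Spec_solution; infer_instance

-- ===== CLAIM (what is proved, stated in full; the proofs are below) =====
def Claim_equal_solution : Prop := ∀ (research : List String) (n : Int) (k : Int), Dom_solution research n k → Pre_solution research n k → Spec_solution research n k (solution research n k)

-- ===== LEMMAS AND PROOFS =====

-- proof-only abbreviations
def pvCnt (research : List String) (a : Char) : List Int :=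
  research.map (fun r => (PySem.Str.count r (String.ofList [a]) : Int))

def pvWin (c : List Int) (n : Int) (i : Nat) : List Int := (c.drop i).take n.toNat

def pvOK (c : List Int) (n k : Int) (i : Nat) : Bool :=
  decide (2 * n * k ≤ (pvWin c n i).sum) &&
  decide (((pvWin c n i).countP (fun x => decide (x < k)) : Int) = 0)

def pvWins (c : List Int) (n k : Int) : Int :=
  ((List.range (((c.length : Int) - n + 1).toNat)).countP (pvOK c n k) : Int)

def pvLtB (p q : Char × Int) : Bool :=
  decide (-p.2 < -q.2) || (!decide (-q.2 < -p.2) && decide (p.1 < q.1))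

def pvStepSel (wf : Char → Int) (best : Option (Char × Int)) (a : Char) : Option (Char × Int) :=
  if decide (0 < wf a) && (match best with | none => true | some b => decide (b.2 < wf a)) then
    some (a, wf a)
  else best

-- pvLtB is the strict lexicographic order sorted2 uses; basic order facts
lemma pv_ltB_iff (p q : Char × Int) :
    pvLtB p q = true ↔ (q.2 < p.2 ∨ (p.2 = q.2 ∧ p.1 < q.1)) := by
  simp only [pvLtB, Bool.or_eq_true, Bool.and_eq_true, Bool.not_eq_true', decide_eq_true_eq,
    decide_eq_false_iff_not]
  constructor
  · rintro (h | ⟨h1, h2⟩)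
    · left; omega
    · by_cases hq : q.2 < p.2
      · left; exact hq
      · right; exact ⟨by omega, h2⟩
  · rintro (h | ⟨h1, h2⟩)
    · left; omega
    · right; exact ⟨by omega, h2⟩

lemma pv_ltB_irrefl (p : Char × Int) : pvLtB p p = false := by
  simp [pvLtB]

lemma pv_ltB_trans {p q r : Char × Int} (h1 : pvLtB p q = true) (h2 : pvLtB q r = true) :
    pvLtB p r = true := by
  rw [pv_ltB_iff] at h1 h2 ⊢
  rcases h1 with h | ⟨e, hc⟩ <;> rcases h2 with h' | ⟨e', hc'⟩
  · left; omega
  · left; omega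
  · left; omega
  · right; exact ⟨by omega, lt_trans hc hc'⟩

lemma pv_ltB_asymm {p q : Char × Int} (h : pvLtB p q = true) : pvLtB q p = false := by
  by_contra hb
  have h2 : pvLtB q p = true := by
    cases hqp : pvLtB q p with
    | false => exact absurd hqp hb
    | true => rfl
  rw [pv_ltB_iff] at h h2
  rcases h with h | ⟨e, hc⟩ <;> rcases h2 with h' | ⟨e', hc'⟩
  · omega
  · omega
  · omega
  · exact absurd hc' (lt_asymm hc)

-- sorted2 with A's key produces a pvLtB-sorted list
lemma pv_insertBy_pairwise (x : Char × Int) :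
    ∀ (acc : List (Char × Int)), acc.Pairwise (fun a b => pvLtB b a = false) →
      (PySem.List.insertBy (fun a b => pvLtB a b) x acc).Pairwise (fun a b => pvLtB b a = false) := by
  intro acc
  induction acc with
  | nil => intro _; simp [PySem.List.insertBy]
  | cons y ys ih =>
    intro h
    rw [List.pairwise_cons] at h
    obtain ⟨hy, hys⟩ := h
    by_cases hxy : pvLtB x y = true
    · rw [show PySem.List.insertBy (fun a b => pvLtB a b) x (y :: ys) = x :: y :: ys by
        simp [PySem.List.insertBy, hxy]]
      refine List.pairwise_cons.mpr ⟨?_, List.pairwise_cons.mpr ⟨hy, hys⟩⟩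
      intro z hz
      rcases List.mem_cons.mp hz with rfl | hz
      · exact pv_ltB_asymm hxy
      · by_contra hzx
        have hzx' : pvLtB z x = true := by
          cases hc : pvLtB z x with
          | false => exact absurd hc hzx
          | true => rfl
        have : pvLtB z y = true := pv_ltB_trans hzx' hxy
        rw [hy z hz] at this; exact Bool.false_ne_true this
    · have hxy' : pvLtB x y = false := by
        cases hc : pvLtB x y with
        | false => rfl
        | true => exact absurd hc hxy
      rw [show PySem.List.insertBy (fun a b => pvLtB a b) x (y :: ys)
            = y :: PySem.List.insertBy (fun a b => pvLtB a b) x ys by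
        simp [PySem.List.insertBy, hxy']]
      refine List.pairwise_cons.mpr ⟨?_, ih hys⟩
      intro z hz
      rcases (PySem.List.mem_insertBy _ x z ys).mp hz with rfl | hz
      · exact hxy'
      · exact hy z hz

lemma pv_sorted2_eq_foldl (l : List (Char × Int)) :
    PySem.List.sorted2 l (fun x => -x.2) (fun x => x.1) false
      = l.foldl (fun acc x => PySem.List.insertBy (fun a b => pvLtB a b) x acc) [] := rfl

lemma pv_sorted2_pairwise (l : List (Char × Int)) :
    (PySem.List.sorted2 l (fun x => -x.2) (fun x => x.1) false).Pairwise
      (fun a b => pvLtB b a = false) := by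
  rw [pv_sorted2_eq_foldl]
  have key : ∀ (l acc : List (Char × Int)), acc.Pairwise (fun a b => pvLtB b a = false) →
      (l.foldl (fun acc x => PySem.List.insertBy (fun a b => pvLtB a b) x acc) acc).Pairwise
        (fun a b => pvLtB b a = false) := by
    intro l
    induction l with
    | nil => intro acc h; exact h
    | cons x t ih => intro acc h; exact ih _ (pv_insertBy_pairwise x acc h)
  exact key l [] List.Pairwise.nil

lemma pv_sorted2_head {l : List (Char × Int)} {m : Char × Int} {rest : List (Char × Int)}
    (h : PySem.List.sorted2 l (fun x => -x.2) (fun x => x.1) false = m :: rest) :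
    m ∈ l ∧ ∀ q ∈ l, pvLtB q m = false := by
  have hperm : (m :: rest).Perm l := by
    have := PySem.List.sorted2_perm l (fun x => -x.2) (fun x => x.1) false
    rwa [h] at this
  constructor
  · exact hperm.mem_iff.mp (List.mem_cons_self)
  · intro q hq
    rcases List.mem_cons.mp (hperm.mem_iff.mpr hq) with rfl | hq'
    · exact pv_ltB_irrefl q
    · have hp := pv_sorted2_pairwise l
      rw [h, List.pairwise_cons] at hp
      exact hp.1 q hq'

lemma pv_sorted2_nil {l : List (Char × Int)}
    (h : PySem.List.sorted2 l (fun x => -x.2) (fun x => x.1) false = []) : l = [] := by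
  have hperm := PySem.List.sorted2_perm l (fun x => -x.2) (fun x => x.1) false
  rw [h] at hperm
  exact hperm.symm.eq_nil

-- one step of B's selection fold
lemma pv_stepSel_cases (wf : Char → Int) (best : Option (Char × Int)) (a : Char) :
    (pvStepSel wf best a = some (a, wf a) ∧ 0 < wf a ∧ (∀ b, best = some b → b.2 < wf a))
    ∨ (pvStepSel wf best a = best ∧ (0 < wf a → ∃ b, best = some b ∧ wf a ≤ b.2)) := by
  cases best with
  | none =>
    by_cases h : 0 < wf a
    · left
      refine ⟨by simp [pvStepSel, h], h, by simp⟩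
    · right
      exact ⟨by simp [pvStepSel, h], fun hc => absurd hc h⟩
  | some b =>
    by_cases h : 0 < wf a
    · by_cases h2 : b.2 < wf a
      · left
        refine ⟨by simp [pvStepSel, h, h2], h, ?_⟩
        rintro b' hb'
        rw [Option.some.inj hb'] at h2
        exact h2
      · right
        exact ⟨by simp [pvStepSel, h2], fun _ => ⟨b, rfl, not_lt.mp h2⟩⟩
    · right
      exact ⟨by simp [pvStepSel, h], fun hc => absurd hc h⟩

-- B's running-first-strict-max fold: its result is the pvLtB-minimum of the winning letters
lemma pv_sel_aux (wf : Char → Int) :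
    ∀ (alphas : List Char) (best : Option (Char × Int)),
      alphas.Pairwise (· < ·) →
      (∀ b, best = some b → (0 < b.2 ∧ ∀ a ∈ alphas, b.1 < a)) →
      (alphas.foldl (pvStepSel wf) best = none → best = none ∧ ∀ a ∈ alphas, ¬ 0 < wf a) ∧
      (∀ p, alphas.foldl (pvStepSel wf) best = some p →
        (best = some p ∨ (p.1 ∈ alphas ∧ p.2 = wf p.1 ∧ 0 < p.2)) ∧
        (∀ b, best = some b → b ≠ p → pvLtB p b = true) ∧
        (∀ a ∈ alphas, 0 < wf a → (a, wf a) ≠ p → pvLtB p (a, wf a) = true)) := by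
  intro alphas
  induction alphas with
  | nil =>
    intro best _ _
    constructor
    · intro h; exact ⟨h, by simp⟩
    · intro p h
      simp only [List.foldl_nil] at h
      refine ⟨Or.inl h, ?_, by simp⟩
      intro b hb hne
      rw [h] at hb
      exact absurd (Option.some.inj hb).symm hne
  | cons a t ih =>
    intro best hpw hbest
    rw [List.pairwise_cons] at hpw
    obtain ⟨ha_lt, hpw'⟩ := hpw
    simp only [List.foldl_cons]
    rcases pv_stepSel_cases wf best a with ⟨hstep, hwfa, hbeat⟩ | ⟨hstep, hblock⟩
    · rw [hstep]
      have IH := ih (some (a, wf a)) hpw'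
        (by rintro b hb; cases Option.some.inj hb; exact ⟨hwfa, ha_lt⟩)
      constructor
      · intro h
        exact absurd (IH.1 h).1 (by simp)
      · intro p h
        obtain ⟨C1, C2, C3⟩ := IH.2 p h
        have hpa : (a, wf a) = p ∨ pvLtB p (a, wf a) = true := by
          by_cases he : (a, wf a) = p
          · left; exact he
          · right; exact C2 _ rfl he
        refine ⟨?_, ?_, ?_⟩
        · rcases C1 with h1 | h1
          · have hpe : p = (a, wf a) := (Option.some.inj h1).symm
            right
            refine ⟨?_, ?_, ?_⟩
            · rw [hpe]; exact List.mem_cons_self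
            · rw [hpe]
            · rw [hpe]; exact hwfa
          · right; exact ⟨List.mem_cons_of_mem _ h1.1, h1.2.1, h1.2.2⟩
        · intro b hb hne
          have hb2 : b.2 < wf a := hbeat b hb
          have hab : pvLtB (a, wf a) b = true := by
            rw [pv_ltB_iff]; left; exact hb2
          rcases hpa with he | hlt
          · rw [← he]; exact hab
          · exact pv_ltB_trans hlt hab
        · intro x hx hwx hne
          rcases List.mem_cons.mp hx with rfl | hx'
          · rcases hpa with he | hlt
            · exact absurd he hne
            · exact hlt
          · exact C3 x hx' hwx hne
    · rw [hstep]
      have IH := ih best hpw'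
        (by
          intro b hb
          exact ⟨(hbest b hb).1, fun x hx => (hbest b hb).2 x (List.mem_cons_of_mem _ hx)⟩)
      constructor
      · intro h
        obtain ⟨hb0, hall⟩ := IH.1 h
        refine ⟨hb0, ?_⟩
        intro x hx
        rcases List.mem_cons.mp hx with rfl | hx'
        · intro hwx
          obtain ⟨b, hb, -⟩ := hblock hwx
          rw [hb0] at hb
          simp at hb
        · exact hall x hx'
      · intro p h
        obtain ⟨C1, C2, C3⟩ := IH.2 p h
        refine ⟨?_, C2, ?_⟩
        · rcases C1 with h1 | h1
          · left; exact h1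
          · right; exact ⟨List.mem_cons_of_mem _ h1.1, h1.2.1, h1.2.2⟩
        · intro x hx hwx hne
          rcases List.mem_cons.mp hx with rfl | hx'
          · obtain ⟨b, hb, hble⟩ := hblock hwx
            have hb1 : b.1 < x := (hbest b hb).2 x List.mem_cons_self
            have hbx : pvLtB b (x, wf x) = true := by
              rw [pv_ltB_iff]
              rcases lt_or_eq_of_le hble with hlt | heq
              · left; exact hlt
              · right; exact ⟨heq.symm, hb1⟩
            by_cases hbp : b = p
            · rw [← hbp]; exact hbx
            · exact pv_ltB_trans (C2 b hb hbp) hbx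
          · exact C3 x hx' hwx hne

-- the per-letter count dictionary A builds
lemma pv_modfold_getD (research : List String) (al : Char) :
    ∀ (d : PySem.Dict Char (List Int)) (a : Char),
      (research.foldl
        (fun d r => d.modify al [] (fun l => l ++ [(PySem.Str.count r (String.ofList [al]) : Int)]))
        d).getD a []
      = if a = al then d.getD a [] ++ pvCnt research al else d.getD a [] := by
  induction research with
  | nil => intro d a; simp [pvCnt]
  | cons r t ih =>
    intro d a
    simp only [List.foldl_cons, ih, PySem.Dict.getD_modify]
    by_cases h : a = al
    · subst h
      simp [pvCnt]
    · simp [h]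

lemma pv_modfold_contains (research : List String) (al : Char) :
    ∀ (d : PySem.Dict Char (List Int)) (b : Char), d.contains al = true →
      (research.foldl
        (fun d r => d.modify al [] (fun l => l ++ [(PySem.Str.count r (String.ofList [al]) : Int)]))
        d).contains b
      = (b == al || d.contains b) := by
  induction research with
  | nil =>
    intro d b hal
    cases hb : (b == al)
    · simp
    · have : b = al := by simpa using hb
      subst this
      simp [hal]
  | cons r t ih =>
    intro d b hal
    simp only [List.foldl_cons]
    rw [ih _ b (by rw [PySem.Dict.contains_modify]; simp), PySem.Dict.contains_modify]
    cases hb : (b == al) <;> simp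

lemma pv_modfold_keys (research : List String) (al : Char) :
    ∀ (d : PySem.Dict Char (List Int)), d.contains al = true →
      (research.foldl
        (fun d r => d.modify al [] (fun l => l ++ [(PySem.Str.count r (String.ofList [al]) : Int)]))
        d).keys = d.keys := by
  induction research with
  | nil => intro d _; rfl
  | cons r t ih =>
    intro d hd
    simp only [List.foldl_cons]
    rw [ih _ (by rw [PySem.Dict.contains_modify]; simp [hd]),
      PySem.Dict.keys_modify, PySem.Dict.keys_insert_of_contains _ _ hd]

lemma pv_dct_getD (research : List String) :
    ∀ (alphas : List Char) (d : PySem.Dict Char (List Int)) (a : Char),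
      (alphas.foldl (fun d alpha =>
        research.foldl
          (fun d r => d.modify alpha [] (fun l => l ++ [(PySem.Str.count r (String.ofList [alpha]) : Int)]))
          (d.insert alpha [])) d).getD a []
      = if a ∈ alphas then pvCnt research a else d.getD a [] := by
  intro alphas
  induction alphas with
  | nil => intro d a; simp
  | cons al t ih =>
    intro d a
    simp only [List.foldl_cons, ih]
    by_cases hmem : a ∈ t
    · simp [hmem]
    · rw [if_neg hmem, pv_modfold_getD]
      by_cases h : a = al
      · subst h
        rw [if_pos rfl, if_pos List.mem_cons_self, PySem.Dict.getD_insert_self]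
        simp
      · rw [if_neg h, if_neg (by simp [h, hmem]), PySem.Dict.getD_insert, if_neg h]

lemma pv_dct_keys (research : List String) :
    ∀ (alphas : List Char) (d : PySem.Dict Char (List Int)), alphas.Nodup →
      (∀ al ∈ alphas, d.contains al = false) →
      (alphas.foldl (fun d alpha =>
        research.foldl
          (fun d r => d.modify alpha [] (fun l => l ++ [(PySem.Str.count r (String.ofList [alpha]) : Int)]))
          (d.insert alpha [])) d).keys = d.keys ++ alphas := by
  intro alphas
  induction alphas with
  | nil => intro d _ _; simp
  | cons al t ih =>
    intro d hnd hfresh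
    rw [List.nodup_cons] at hnd
    simp only [List.foldl_cons]
    have hcont : (d.insert al ([] : List Int)).contains al = true := by
      rw [PySem.Dict.contains_insert]; simp
    rw [ih _ hnd.2 ?fresh, pv_modfold_keys _ _ _ hcont,
      PySem.Dict.keys_insert_of_not_contains _ _ (hfresh al List.mem_cons_self)]
    · simp
    case fresh =>
      intro b hb
      rw [pv_modfold_contains _ _ _ _ (by rw [PySem.Dict.contains_insert]; simp), PySem.Dict.contains_insert]
      have hne : b ≠ al := fun he => hnd.1 (he ▸ hb)
      simp [hne, hfresh b (List.mem_cons_of_mem _ hb)]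

-- the window-counting dictionary A builds, for an abstract window condition
lemma pv_cntfold_getD (cond : Char → Bool) :
    ∀ (keys : List Char) (ans : PySem.Dict Char Int) (a : Char),
      (keys.foldl (fun ans key =>
        if cond key then
          (if ans.contains key then ans.modify key 0 (· + 1) else ans.insert key 1)
        else ans) ans).getD a 0
      = ans.getD a 0 + if cond a then (keys.count a : Int) else 0 := by
  intro keys
  induction keys with
  | nil => intro ans a; simp
  | cons key t ih =>
    intro ans a
    simp only [List.foldl_cons, ih]
    have hstep : (if cond key then
          (if ans.contains key then ans.modify key 0 (· + 1) else ans.insert key 1)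
        else ans).getD a 0 = ans.getD a 0 + if a = key ∧ cond key then 1 else 0 := by
      by_cases hc : cond key
      · simp only [hc, if_true]
        by_cases hin : ans.contains key
        · simp only [hin, if_true, PySem.Dict.getD_modify]
          by_cases he : a = key <;> simp [he]
        · simp only [hin, if_false, Bool.false_eq_true, PySem.Dict.getD_insert]
          by_cases he : a = key
          · subst he
            rw [PySem.Dict.getD_of_not_contains _ _ (Bool.eq_false_iff.mpr hin)]
            simp
          · simp [he]
      · simp [hc]
    rw [hstep, List.count_cons]
    by_cases he : a = key
    · subst he
      by_cases hc : cond a <;> simp [hc] <;> push_cast <;> ring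
    · have : (key == a) = false := by simp [Ne.symm he]
      simp only [this, if_neg (fun hh : a = key ∧ cond key => he hh.1)]
      push_cast
      by_cases hc : cond a <;> simp [hc] <;> ring

lemma pv_cntfold_contains (cond : Char → Bool) :
    ∀ (keys : List Char) (ans : PySem.Dict Char Int) (b : Char),
      (keys.foldl (fun ans key =>
        if cond key then
          (if ans.contains key then ans.modify key 0 (· + 1) else ans.insert key 1)
        else ans) ans).contains b
      = (ans.contains b || (decide (b ∈ keys) && cond b)) := by
  intro keys
  induction keys with
  | nil => intro ans b; simp
  | cons key t ih =>
    intro ans b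
    simp only [List.foldl_cons, ih]
    have hstep : (if cond key then
          (if ans.contains key then ans.modify key 0 (· + 1) else ans.insert key 1)
        else ans).contains b = (ans.contains b || (b == key && cond key)) := by
      by_cases hc : cond key
      · simp only [hc, if_true]
        by_cases hin : ans.contains key
        · rw [if_pos hin, PySem.Dict.contains_modify]
          cases hbe : (b == key)
          · simp
          · have : b = key := by simpa using hbe
            subst this
            simp [hin]
        · rw [if_neg (by simp [hin]), PySem.Dict.contains_insert]
          simp [Bool.or_comm]
      · simp [hc]
    rw [hstep]
    by_cases he : b = key
    · subst he
      have hmc : (decide (b ∈ b :: t)) = true := by simp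
      cases h1 : ans.contains b <;> cases h2 : cond b <;> cases h3 : decide (b ∈ t) <;>
        simp [h1, h2, h3, hmc]
    · have h1 : (b == key) = false := by simp [he]
      have h2 : (b ∈ key :: t) ↔ (b ∈ t) := by simp [he]
      simp only [h1, h2]
      cases ans.contains b <;> simp

-- the outer loop over window starts
lemma pv_winfold_getD (cond2 : Int → Char → Bool) (keys : List Char) :
    ∀ (is : List Int) (ans : PySem.Dict Char Int) (a : Char),
      (is.foldl (fun ans i => keys.foldl (fun ans key =>
        if cond2 i key then
          (if ans.contains key then ans.modify key 0 (· + 1) else ans.insert key 1)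
        else ans) ans) ans).getD a 0
      = ans.getD a 0 + (keys.count a : Int) * (is.countP (fun i => cond2 i a) : Int) := by
  intro is
  induction is with
  | nil => intro ans a; simp
  | cons i t ih =>
    intro ans a
    simp only [List.foldl_cons, ih, pv_cntfold_getD, List.countP_cons]
    by_cases hc : cond2 i a <;> simp [hc] <;> push_cast <;> ring

lemma pv_winfold_contains (cond2 : Int → Char → Bool) (keys : List Char) :
    ∀ (is : List Int) (ans : PySem.Dict Char Int) (b : Char),
      (is.foldl (fun ans i => keys.foldl (fun ans key =>
        if cond2 i key then
          (if ans.contains key then ans.modify key 0 (· + 1) else ans.insert key 1)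
        else ans) ans) ans).contains b
      = (ans.contains b || (decide (b ∈ keys) && is.any (fun i => cond2 i b))) := by
  intro is
  induction is with
  | nil => intro ans b; simp
  | cons i t ih =>
    intro ans b
    simp only [List.foldl_cons, ih, pv_cntfold_contains, List.any_cons]
    cases h1 : ans.contains b <;> cases h2 : decide (b ∈ keys) <;>
      cases h3 : cond2 i b <;> simp

-- the sorted list of distinct letters both programs build
def pvAlphas (research : List String) : List Char :=
  PySem.List.sorted
    (research.foldl (fun s r => r.toList.foldl (fun s c => PySem.Set.add s c) s) ([] : PySem.Set Char))
    (fun x => x) false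

lemma pv_set_nodup (research : List String) :
    (research.foldl (fun s r => r.toList.foldl (fun s c => PySem.Set.add s c) s)
      ([] : PySem.Set Char)).Nodup := by
  have inner : ∀ (l : List Char) (s : PySem.Set Char), s.Nodup →
      (l.foldl (fun s c => PySem.Set.add s c) s).Nodup := by
    intro l
    induction l with
    | nil => intro s h; exact h
    | cons c t ih => intro s h; exact ih _ (PySem.Set.nodup_add s c h)
  have outer : ∀ (rs : List String) (s : PySem.Set Char), s.Nodup →
      (rs.foldl (fun s r => r.toList.foldl (fun s c => PySem.Set.add s c) s) s).Nodup := by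
    intro rs
    induction rs with
    | nil => intro s h; exact h
    | cons r t ih => intro s h; exact ih _ (inner _ _ h)
  exact outer research [] List.nodup_nil

lemma pv_alphas_sorted (research : List String) : (pvAlphas research).Pairwise (· < ·) := by
  have hle := PySem.List.sorted_pairwise
    (research.foldl (fun s r => r.toList.foldl (fun s c => PySem.Set.add s c) s)
      ([] : PySem.Set Char)) (fun x => x)
  have hnd : (pvAlphas research).Nodup :=
    ((PySem.List.sorted_perm _ _ _).nodup_iff).mpr (pv_set_nodup research)
  exact (hle.and hnd).imp (fun h => lt_of_le_of_ne h.1 h.2)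

-- empty integer ranges
lemma pv_pyRange_nil {a b : Int} (h : b ≤ a) : PySem.List.pyRange a b = [] := by
  rw [List.eq_nil_iff_forall_not_mem]
  intro x hx
  rw [PySem.List.mem_pyRange_one] at hx
  omega

lemma pv_pyRange_map (a : Nat) : ∀ (m : Nat),
    PySem.List.pyRange (a : Int) ((a : Int) + (m : Int))
      = (List.range m).map (fun t => ((a + t : Nat) : Int)) := by
  intro m
  induction m with
  | zero => simpa using pv_pyRange_nil (le_of_eq (by ring))
  | succ m ih =>
    rw [show ((a : Int) + ((m + 1 : Nat) : Int)) = ((a : Int) + (m : Int)) + 1 by push_cast; ring,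
      PySem.List.pyRange_one_succ_right (by omega), ih, List.range_succ, List.map_append]
    simp

-- a window as a map over its offsets
lemma pv_window_map (temp : List Int) (iN nN : Nat) (h : iN + nN ≤ temp.length) :
    (temp.drop iN).take nN = (List.range nN).map (fun t => temp.getD (iN + t) 0) := by
  apply List.ext_getElem
  · simp only [List.length_take, List.length_drop, List.length_map, List.length_range]
    omega
  · intro i h1 h2
    simp only [List.getElem_take, List.getElem_drop, List.getElem_map, List.getElem_range]
    rw [List.getD_eq_getElem _ _ (by
      simp only [List.length_take, List.length_drop] at h1
      omega)]

-- A's inner validity loop (with break) is an `all` over the window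
lemma pv_vfalse (temp : List Int) (k : Int) :
    ∀ l : List Int,
      l.foldl (fun v j => if v then (if PySem.List.pyGetD temp j 0 < k then false else v) else v)
        false = false := by
  intro l
  induction l with
  | nil => rfl
  | cons j t ih => exact ih

lemma pv_vfold_gen (temp : List Int) (k : Int) :
    ∀ l : List Int,
      l.foldl (fun v j => if v then (if PySem.List.pyGetD temp j 0 < k then false else v) else v)
        true = l.all (fun j => !decide (PySem.List.pyGetD temp j 0 < k)) := by
  intro l
  induction l with
  | nil => rfl
  | cons j t ih =>
    rw [List.foldl_cons]
    show List.foldl _ (if PySem.List.pyGetD temp j 0 < k then false else true) t = _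
    by_cases hj : PySem.List.pyGetD temp j 0 < k
    · rw [if_pos hj, pv_vfalse]
      simp [hj]
    · rw [if_neg hj, ih]
      simp [hj]

lemma pv_all_countP (l : List Int) (k : Int) :
    (l.all fun c => !decide (c < k))
      = decide (((l.countP (fun x => decide (x < k)) : Nat) : Int) = 0) := by
  by_cases h : ∀ x ∈ l, ¬ x < k
  · have h1 : (l.all fun c => !decide (c < k)) = true := by
      rw [List.all_eq_true]; intro x hx; simpa using h x hx
    have h2 : l.countP (fun x => decide (x < k)) = 0 :=
      List.countP_eq_zero.mpr (by intro x hx; simpa using h x hx)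
    simp [h1, h2]
  · push_neg at h
    obtain ⟨x, hx, hxk⟩ := h
    have h1 : (l.all fun c => !decide (c < k)) = false := by
      rw [List.all_eq_false]
      exact ⟨x, hx, by simpa using hxk⟩
    have h2 : l.countP (fun x => decide (x < k)) ≠ 0 := by
      intro hz
      exact absurd hxk (by simpa using List.countP_eq_zero.mp hz x hx)
    simp [h1, h2]

-- A's per-window test equals pvOK
lemma pv_condA_eq (temp : List Int) (n k : Int) (nN iN : Nat) (hn : n = (nN : Int))
    (hle : iN + nN ≤ temp.length) :
    ((!decide ((PySem.List.slice temp (some (iN : Int)) (some ((iN : Int) + n))).sum < 2 * n * k)) &&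
     (PySem.List.pyRange (iN : Int) ((iN : Int) + n)).foldl
       (fun v j => if v then (if PySem.List.pyGetD temp j 0 < k then false else v) else v) true)
    = pvOK temp n k iN := by
  subst hn
  have hsl : PySem.List.slice temp (some (iN : Int)) (some ((iN : Int) + (nN : Int)))
      = (temp.drop iN).take nN := by
    rw [show ((iN : Int) + (nN : Int)) = ((iN + nN : Nat) : Int) by push_cast; ring,
      PySem.List.slice_natCast]
    congr 1
    omega
  have hwin : pvWin temp ((nN : Nat) : Int) iN = (temp.drop iN).take nN := by
    simp [pvWin]
  have hv : (PySem.List.pyRange (iN : Int) ((iN : Int) + (nN : Int))).foldl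
      (fun v j => if v then (if PySem.List.pyGetD temp j 0 < k then false else v) else v) true
      = ((temp.drop iN).take nN).all (fun c => !decide (c < k)) := by
    rw [pv_vfold_gen, pv_pyRange_map, List.all_map, pv_window_map temp iN nN hle, List.all_map]
    congr 1
    funext t
    show (!decide (PySem.List.pyGetD temp ((iN + t : Nat) : Int) 0 < k))
      = (!decide (temp.getD (iN + t) 0 < k))
    rw [PySem.List.pyGetD_natCast]
  rw [hv, hsl, pvOK, hwin, pv_all_countP]
  congr 1
  by_cases hs : 2 * (nN : Int) * k ≤ (List.take nN (List.drop iN temp)).sum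
  · simp [hs, not_lt.mpr hs]
  · simp [hs, not_le.mp hs]

-- the sliding-window shift identities
lemma pv_shift_split (c : List Int) (m' t : Nat) (h : t + 1 + (m' + 1) ≤ c.length) :
    (c.drop t).take (m' + 1) = c.getD t 0 :: (c.drop (t + 1)).take m'
    ∧ (c.drop (t + 1)).take (m' + 1)
        = (c.drop (t + 1)).take m' ++ [c.getD (t + (m' + 1)) 0] := by
  have ht : t < c.length := by omega
  constructor
  · rw [List.getD_eq_getElem _ _ ht, List.drop_eq_getElem_cons ht, List.take_succ_cons]
  · have hsome : (c.drop (t + 1))[m']? = some (c.getD (t + (m' + 1)) 0) := by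
      have he : t + 1 + m' = t + (m' + 1) := by omega
      rw [List.getElem?_drop, he, List.getElem?_eq_getElem (show t + (m' + 1) < c.length by omega),
        List.getD_eq_getElem _ _ (show t + (m' + 1) < c.length by omega)]
    rw [List.take_add_one, hsome]
    rfl

lemma pv_sum_shift (c : List Int) (nN t : Nat) (h : t + 1 + nN ≤ c.length) :
    ((c.drop (t + 1)).take nN).sum = ((c.drop t).take nN).sum + c.getD (t + nN) 0 - c.getD t 0 := by
  rcases Nat.eq_zero_or_pos nN with rfl | h1
  · simp
  obtain ⟨m', rfl⟩ : ∃ m', nN = m' + 1 := ⟨nN - 1, by omega⟩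
  obtain ⟨h2, h3⟩ := pv_shift_split c m' t h
  rw [h2, h3, List.sum_append, List.sum_cons]
  simp [List.sum_cons]
  ring

lemma pv_cnt_shift (c : List Int) (k : Int) (nN t : Nat)
    (h : t + 1 + nN ≤ c.length) :
    ((((c.drop (t + 1)).take nN).countP (fun x => decide (x < k)) : Nat) : Int)
      = (((c.drop t).take nN).countP (fun x => decide (x < k)) : Int)
        + (if c.getD (t + nN) 0 < k then (1 : Int) else 0)
        - (if c.getD t 0 < k then (1 : Int) else 0) := by
  rcases Nat.eq_zero_or_pos nN with rfl | h1
  · simp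
  obtain ⟨m', rfl⟩ : ∃ m', nN = m' + 1 := ⟨nN - 1, by omega⟩
  obtain ⟨h2, h3⟩ := pv_shift_split c m' t h
  rw [h2, h3, List.countP_append]
  simp only [List.countP_cons, List.countP_nil, decide_eq_true_eq]
  by_cases hc1 : c.getD (t + (m' + 1)) 0 < k <;> by_cases hc2 : c.getD t 0 < k <;>
    simp only [hc1, hc2, if_true, if_false, ite_true, ite_false] <;> push_cast <;> ring
lemma pv_ok_iff (c : List Int) (n k : Int) (i : Nat) :
    pvOK c n k i = true
      ↔ (2 * n * k ≤ (pvWin c n i).sum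
         ∧ (((pvWin c n i).countP (fun x => decide (x < k)) : Nat) : Int) = 0) := by
  simp [pvOK]

-- B's incremental pass computes every window's sum, below-k count and the running win count
lemma pv_slide (c : List Int) (n k : Int) (nN : Nat) (hn : n = (nN : Int))
    (m : Nat) (hm : m + nN = c.length) :
    ∀ t, t ≤ m →
      ((PySem.List.pyRange 1 (1 + (t : Int))).foldl
        (fun (st : Int × Int × Int) i =>
          (st.1 + (PySem.List.pyGetD c (i + n - 1) 0 - PySem.List.pyGetD c (i - 1) 0),
           st.2.1 + ((if PySem.List.pyGetD c (i + n - 1) 0 < k then (1 : Int) else 0)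
             - (if PySem.List.pyGetD c (i - 1) 0 < k then (1 : Int) else 0)),
           if 2 * n * k ≤ st.1 + (PySem.List.pyGetD c (i + n - 1) 0 - PySem.List.pyGetD c (i - 1) 0)
              ∧ st.2.1 + ((if PySem.List.pyGetD c (i + n - 1) 0 < k then (1 : Int) else 0)
                - (if PySem.List.pyGetD c (i - 1) 0 < k then (1 : Int) else 0)) = 0
           then st.2.2 + 1 else st.2.2))
        ((c.take nN).sum, ((c.take nN).countP (fun x => decide (x < k)) : Int),
          if 2 * n * k ≤ (c.take nN).sum
             ∧ (((c.take nN).countP (fun x => decide (x < k)) : Nat) : Int) = 0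
          then (1 : Int) else 0))
      = (((c.drop t).take nN).sum,
         (((c.drop t).take nN).countP (fun x => decide (x < k)) : Int),
         (((List.range (t + 1)).countP (pvOK c n k) : Nat) : Int)) := by
  intro t
  induction t with
  | zero =>
    intro _
    rw [show (1 + ((0 : Nat) : Int)) = 1 by norm_num, pv_pyRange_nil le_rfl, List.foldl_nil]
    have hw0 : pvWin c n 0 = c.take nN := by simp [pvWin, hn]
    refine Prod.ext (by simp) (Prod.ext (by simp) ?_)
    show (if 2 * n * k ≤ (c.take nN).sum
             ∧ (((c.take nN).countP (fun x => decide (x < k)) : Nat) : Int) = 0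
          then (1 : Int) else 0)
        = (((List.range 1).countP (pvOK c n k) : Nat) : Int)
    rw [List.range_one, show List.countP (pvOK c n k) [0] = if pvOK c n k 0 then 1 else 0 by
      simp [List.countP_cons]]
    by_cases h : 2 * n * k ≤ (c.take nN).sum
        ∧ (((c.take nN).countP (fun x => decide (x < k)) : Nat) : Int) = 0
    · rw [if_pos h, if_pos (by rw [pv_ok_iff, hw0]; exact h)]
      rfl
    · rw [if_neg h, if_neg (by rw [pv_ok_iff, hw0]; exact h)]
      rfl
  | succ t iht =>
    intro ht
    have hlen : t + 1 + nN ≤ c.length := by omega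
    rw [show (1 + ((t + 1 : Nat) : Int)) = (1 + (t : Int)) + 1 by push_cast; ring,
      PySem.List.pyRange_one_succ_right (by omega), List.foldl_append, iht (by omega),
      List.foldl_cons, List.foldl_nil]
    have hout : PySem.List.pyGetD c ((1 + (t : Int)) - 1) 0 = c.getD t 0 := by
      rw [show (1 + (t : Int)) - 1 = ((t : Nat) : Int) by push_cast; ring,
        PySem.List.pyGetD_natCast]
    have hin : PySem.List.pyGetD c ((1 + (t : Int)) + n - 1) 0 = c.getD (t + nN) 0 := by
      rw [show (1 + (t : Int)) + n - 1 = ((t + nN : Nat) : Int) by rw [hn]; push_cast; ring,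
        PySem.List.pyGetD_natCast]
    rw [hout, hin]
    have hsum := pv_sum_shift c nN t hlen
    have hcnt := pv_cnt_shift c k nN t hlen
    have hS : ((c.drop t).take nN).sum + (c.getD (t + nN) 0 - c.getD t 0)
        = ((c.drop (t + 1)).take nN).sum := by omega
    have hB : (((c.drop t).take nN).countP (fun x => decide (x < k)) : Int)
          + ((if c.getD (t + nN) 0 < k then (1 : Int) else 0)
            - (if c.getD t 0 < k then (1 : Int) else 0))
        = (((c.drop (t + 1)).take nN).countP (fun x => decide (x < k)) : Int) := by omega
    rw [hS, hB]
    refine Prod.ext (by simp) (Prod.ext (by simp) ?_)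
    show (if 2 * n * k ≤ ((c.drop (t + 1)).take nN).sum
             ∧ (((c.drop (t + 1)).take nN).countP (fun x => decide (x < k)) : Nat) = (0 : Int)
          then (((List.range (t + 1)).countP (pvOK c n k) : Nat) : Int) + 1
          else (((List.range (t + 1)).countP (pvOK c n k) : Nat) : Int))
        = (((List.range (t + 1 + 1)).countP (pvOK c n k) : Nat) : Int)
    have hw : pvWin c n (t + 1) = (c.drop (t + 1)).take nN := by simp [pvWin, hn]
    conv_rhs => rw [List.range_succ, List.countP_append,
      show List.countP (pvOK c n k) [t + 1] = if pvOK c n k (t + 1) then 1 else 0 from by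
        simp [List.countP_cons]]
    by_cases h : 2 * n * k ≤ ((c.drop (t + 1)).take nN).sum
        ∧ ((((c.drop (t + 1)).take nN).countP (fun x => decide (x < k)) : Nat) : Int) = 0
    · rw [if_pos h, if_pos (by rw [pv_ok_iff, hw]; exact h)]
      push_cast
      ring
    · rw [if_neg h, if_neg (by rw [pv_ok_iff, hw]; exact h)]
      push_cast
      ring

-- B's per-letter wins value equals pvWins
lemma pv_wins_eq (c : List Int) (L n k : Int) (hL : L = (c.length : Int)) (hpre : 0 ≤ n) :
    (if n ≤ L then
      ((PySem.List.pyRange 1 (L - n + 1)).foldl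
        (fun (st : Int × Int × Int) i =>
          (st.1 + (PySem.List.pyGetD c (i + n - 1) 0 - PySem.List.pyGetD c (i - 1) 0),
           st.2.1 + ((if PySem.List.pyGetD c (i + n - 1) 0 < k then (1 : Int) else 0)
             - (if PySem.List.pyGetD c (i - 1) 0 < k then (1 : Int) else 0)),
           if 2 * n * k ≤ st.1 + (PySem.List.pyGetD c (i + n - 1) 0 - PySem.List.pyGetD c (i - 1) 0)
              ∧ st.2.1 + ((if PySem.List.pyGetD c (i + n - 1) 0 < k then (1 : Int) else 0)
                - (if PySem.List.pyGetD c (i - 1) 0 < k then (1 : Int) else 0)) = 0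
           then st.2.2 + 1 else st.2.2))
        ((PySem.List.slice c none (some n)).sum,
         ((PySem.List.slice c none (some n)).countP (fun x => decide (x < k)) : Int),
         if 2 * n * k ≤ (PySem.List.slice c none (some n)).sum
            ∧ (((PySem.List.slice c none (some n)).countP (fun x => decide (x < k)) : Nat) : Int) = 0
         then (1 : Int) else 0)).2.2
     else 0) = pvWins c n k := by
  subst hL
  by_cases hcase : n ≤ (c.length : Int)
  · rw [if_pos hcase]
    have hn : n = ((n.toNat : Nat) : Int) := by omega
    have hle : n.toNat ≤ c.length := by omega
    have hm : (c.length - n.toNat) + n.toNat = c.length := by omega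
    have hslice : PySem.List.slice c none (some n) = c.take n.toNat := by
      rw [PySem.List.slice_to _ (by omega)]
    have hrange : (c.length : Int) - n + 1 = 1 + ((c.length - n.toNat : Nat) : Int) := by
      push_cast
      omega
    rw [hslice, hrange, pv_slide c n k n.toNat hn (c.length - n.toNat) hm
      (c.length - n.toNat) le_rfl]
    show (((List.range ((c.length - n.toNat) + 1)).countP (pvOK c n k) : Nat) : Int)
      = pvWins c n k
    unfold pvWins
    congr 3
    omega
  · rw [if_neg hcase]
    unfold pvWins
    rw [show ((c.length : Int) - n + 1).toNat = 0 by omega]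
    simp

-- A's dictionaries, with the raw inner step rewritten into guarded form
def pvDct (research : List String) : PySem.Dict Char (List Int) :=
  (pvAlphas research).foldl (fun d alpha =>
    research.foldl
      (fun d r => d.modify alpha [] (fun l => l ++ [(PySem.Str.count r (String.ofList [alpha]) : Int)]))
      (d.insert alpha [])) PySem.Dict.empty

def pvCondA2 (research : List String) (n k : Int) (i : Int) (key : Char) : Bool :=
  (!decide ((PySem.List.slice ((pvDct research).getD key []) (some i) (some (i + n))).sum
      < 2 * n * k)) &&
  (PySem.List.pyRange i (i + n)).foldl
    (fun v j => if v then
      (if PySem.List.pyGetD ((pvDct research).getD key []) j 0 < k then false else v) else v) true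

def pvAnswer (research : List String) (n k : Int) : PySem.Dict Char Int :=
  (PySem.List.pyRange 0 ((research.length : Int) - n + 1)).foldl (fun ans i =>
    (pvDct research).keys.foldl (fun ans key =>
      if pvCondA2 research n k i key then
        (if ans.contains key then ans.modify key 0 (· + 1) else ans.insert key 1)
      else ans) ans) PySem.Dict.empty

lemma pv_rawans (research : List String) (n k : Int) :
    (PySem.List.pyRange 0 ((research.length : Int) - n + 1)).foldl (fun ans i =>
      (pvDct research).keys.foldl (fun ans key =>
        if (PySem.List.slice ((pvDct research).getD key []) (some i) (some (i + n))).sum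
            < 2 * n * k then ans
        else
          if (PySem.List.pyRange i (i + n)).foldl
              (fun v j => if v then
                (if PySem.List.pyGetD ((pvDct research).getD key []) j 0 < k then false else v)
                else v) true
          then (if ans.contains key then ans.modify key 0 (· + 1) else ans.insert key 1)
          else ans) ans) PySem.Dict.empty
    = pvAnswer research n k := by
  unfold pvAnswer
  congr 1
  funext ans i
  rw [show (fun (ans : PySem.Dict Char Int) (key : Char) =>
      if (PySem.List.slice ((pvDct research).getD key []) (some i) (some (i + n))).sum
          < 2 * n * k then ans
      else
        if (PySem.List.pyRange i (i + n)).foldl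
            (fun v j => if v then
              (if PySem.List.pyGetD ((pvDct research).getD key []) j 0 < k then false else v)
              else v) true
        then (if ans.contains key then ans.modify key 0 (· + 1) else ans.insert key 1)
        else ans)
    = (fun (ans : PySem.Dict Char Int) (key : Char) =>
      if pvCondA2 research n k i key then
        (if ans.contains key then ans.modify key 0 (· + 1) else ans.insert key 1)
      else ans) from ?_]
  funext ans key
  unfold pvCondA2
  by_cases hs : (PySem.List.slice ((pvDct research).getD key []) (some i) (some (i + n))).sum
      < 2 * n * k
  · rw [if_pos hs, show (!decide ((PySem.List.slice ((pvDct research).getD key [])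
        (some i) (some (i + n))).sum < 2 * n * k)) = false from by simp [hs],
      Bool.false_and, if_neg (by simp)]
  · rw [if_neg hs, show (!decide ((PySem.List.slice ((pvDct research).getD key [])
        (some i) (some (i + n))).sum < 2 * n * k)) = true from by simp [hs],
      Bool.true_and]

lemma pv_alphas_nodup (research : List String) : (pvAlphas research).Nodup :=
  ((PySem.List.sorted_perm _ _ _).nodup_iff).mpr (pv_set_nodup research)

lemma pv_dctKeys (research : List String) : (pvDct research).keys = pvAlphas research := by
  unfold pvDct
  rw [pv_dct_keys research (pvAlphas research) _ (pv_alphas_nodup research)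
    (fun al _ => PySem.Dict.contains_empty al), PySem.Dict.keys_empty, List.nil_append]

lemma pv_dctGetD (research : List String) (a : Char) (ha : a ∈ pvAlphas research) :
    (pvDct research).getD a [] = pvCnt research a := by
  unfold pvDct
  rw [pv_dct_getD, if_pos ha]

lemma pv_cnt_length (research : List String) (a : Char) :
    (pvCnt research a).length = research.length := by
  simp [pvCnt]

lemma pv_condA2_ok (research : List String) (n k : Int) (nN iN : Nat) (hn : n = (nN : Int))
    (a : Char) (ha : a ∈ pvAlphas research) (hle : iN + nN ≤ research.length) :
    pvCondA2 research n k (iN : Int) a = pvOK (pvCnt research a) n k iN := by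
  unfold pvCondA2
  rw [pv_dctGetD research a ha]
  exact pv_condA_eq (pvCnt research a) n k nN iN hn (by rw [pv_cnt_length]; exact hle)

lemma pv_wins_repr (research : List String) (n k : Int) (a : Char)
    (hc : n ≤ (research.length : Int)) (hpre : 0 ≤ n) :
    pvWins (pvCnt research a) n k
      = (((List.range (research.length - n.toNat + 1)).countP
          (pvOK (pvCnt research a) n k) : Nat) : Int) := by
  unfold pvWins
  rw [show ((((pvCnt research a).length : Nat) : Int) - n + 1).toNat
      = research.length - n.toNat + 1 from by rw [pv_cnt_length]; omega]

lemma pv_wins_zero (research : List String) (n k : Int) (a : Char)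
    (hc : ¬ n ≤ (research.length : Int)) (hpre : 0 ≤ n) :
    pvWins (pvCnt research a) n k = 0 := by
  unfold pvWins
  rw [show ((((pvCnt research a).length : Nat) : Int) - n + 1).toNat = 0 from by
    rw [pv_cnt_length]; omega]
  simp

lemma pv_range_conv (research : List String) (n : Int) (hpre : 0 ≤ n)
    (hc : n ≤ (research.length : Int)) :
    PySem.List.pyRange 0 ((research.length : Int) - n + 1)
      = (List.range (research.length - n.toNat + 1)).map (fun t : Nat => (t : Int)) := by
  rw [show (research.length : Int) - n + 1 = ((research.length - n.toNat + 1 : Nat) : Int) from by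
    push_cast; omega]
  exact PySem.List.pyRange_zero_natCast _

lemma pv_answer_getD (research : List String) (n k : Int) (hpre : 0 ≤ n) (a : Char) :
    (pvAnswer research n k).getD a 0
      = if a ∈ pvAlphas research then pvWins (pvCnt research a) n k else 0 := by
  unfold pvAnswer
  rw [pv_winfold_getD (pvCondA2 research n k) ((pvDct research).keys), PySem.Dict.getD_empty,
    pv_dctKeys]
  by_cases hmem : a ∈ pvAlphas research
  · rw [if_pos hmem, List.count_eq_one_of_mem (pv_alphas_nodup research) hmem]
    by_cases hc : n ≤ (research.length : Int)
    · have hcong : List.countP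
          ((fun i => pvCondA2 research n k i a) ∘ (fun t : Nat => (t : Int)))
          (List.range (research.length - n.toNat + 1))
          = List.countP (pvOK (pvCnt research a) n k)
            (List.range (research.length - n.toNat + 1)) := by
        apply List.countP_congr
        intro x hx
        have hxle : x + n.toNat ≤ research.length := by
          rw [List.mem_range] at hx
          omega
        rw [show ((fun i => pvCondA2 research n k i a) ∘ (fun t : Nat => (t : Int))) x
            = pvCondA2 research n k (x : Int) a from rfl,
          pv_condA2_ok research n k n.toNat x (by omega) a hmem hxle]
      rw [pv_range_conv research n hpre hc, List.countP_map, hcong,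
        pv_wins_repr research n k a hc hpre]
      push_cast
      ring
    · rw [pv_pyRange_nil (by omega), pv_wins_zero research n k a hc hpre]
      simp
  · rw [if_neg hmem, List.count_eq_zero_of_not_mem hmem]
    simp

lemma pv_any_countP (l : List Nat) (p : Nat → Bool) :
    l.any p = decide ((0 : Int) < ((l.countP p : Nat) : Int)) := by
  by_cases h : ∃ x ∈ l, p x = true
  · have h1 : l.any p = true := List.any_eq_true.mpr h
    have h2 : l.countP p ≠ 0 := by
      intro hz
      obtain ⟨x, hx, hpx⟩ := h
      exact absurd hpx (List.countP_eq_zero.mp hz x hx)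
    have h3 : (0 : Int) < ((l.countP p : Nat) : Int) := by
      have := Nat.pos_of_ne_zero h2
      omega
    rw [h1, show decide ((0 : Int) < ((l.countP p : Nat) : Int)) = true from decide_eq_true h3]
  · have h1 : l.any p = false := by
      rw [List.any_eq_false]
      intro x hx
      exact fun hpx => h ⟨x, hx, hpx⟩
    have h2 : l.countP p = 0 := List.countP_eq_zero.mpr (fun x hx hpx => h ⟨x, hx, hpx⟩)
    simp [h1, h2]

lemma pv_answer_contains (research : List String) (n k : Int) (hpre : 0 ≤ n) (b : Char) :
    (pvAnswer research n k).contains b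
      = (decide (b ∈ pvAlphas research) && decide (0 < pvWins (pvCnt research b) n k)) := by
  unfold pvAnswer
  rw [pv_winfold_contains (pvCondA2 research n k) ((pvDct research).keys),
    PySem.Dict.contains_empty, Bool.false_or, pv_dctKeys]
  by_cases hmem : b ∈ pvAlphas research
  · rw [show decide (b ∈ pvAlphas research) = true from by simp [hmem], Bool.true_and,
      Bool.true_and]
    by_cases hc : n ≤ (research.length : Int)
    · have hcong : List.countP
          ((fun i => pvCondA2 research n k i b) ∘ (fun t : Nat => (t : Int)))
          (List.range (research.length - n.toNat + 1))
          = List.countP (pvOK (pvCnt research b) n k)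
            (List.range (research.length - n.toNat + 1)) := by
        apply List.countP_congr
        intro x hx
        have hxle : x + n.toNat ≤ research.length := by
          rw [List.mem_range] at hx
          omega
        rw [show ((fun i => pvCondA2 research n k i b) ∘ (fun t : Nat => (t : Int))) x
            = pvCondA2 research n k (x : Int) b from rfl,
          pv_condA2_ok research n k n.toNat x (by omega) b hmem hxle]
      rw [pv_range_conv research n hpre hc, List.any_map, pv_any_countP, hcong,
        pv_wins_repr research n k b hc hpre]
    · rw [pv_pyRange_nil (by omega), pv_wins_zero research n k b hc hpre]
      simp
  · rw [show decide (b ∈ pvAlphas research) = false from by simp [hmem]]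
    simp

-- membership in A's pre-sort answer list
lemma pv_LA_mem (research : List String) (n k : Int) (hpre : 0 ≤ n) (q : Char × Int) :
    q ∈ (pvAnswer research n k).keys.map
        (fun key => (key, (pvAnswer research n k).getD key 0))
      ↔ (q.1 ∈ pvAlphas research ∧ 0 < pvWins (pvCnt research q.1) n k
         ∧ q = (q.1, pvWins (pvCnt research q.1) n k)) := by
  constructor
  · intro hq
    obtain ⟨key, hkey, heq⟩ := List.mem_map.mp hq
    have hcont : (pvAnswer research n k).contains key = true :=
      (PySem.Dict.contains_iff_mem_keys _ _).mpr hkey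
    rw [pv_answer_contains research n k hpre] at hcont
    simp only [Bool.and_eq_true, decide_eq_true_eq] at hcont
    have hq1 : q.1 = key := by rw [← heq]
    subst hq1
    have hgd : (pvAnswer research n k).getD q.1 0 = pvWins (pvCnt research q.1) n k := by
      rw [pv_answer_getD research n k hpre, if_pos hcont.1]
    exact ⟨hcont.1, hcont.2, by rw [← heq, hgd]⟩
  · rintro ⟨hmem, hpos, hq⟩
    apply List.mem_map.mpr
    refine ⟨q.1, ?_, ?_⟩
    · apply (PySem.Dict.contains_iff_mem_keys _ _).mp
      rw [pv_answer_contains research n k hpre]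
      simp [hmem, hpos]
    · rw [pv_answer_getD research n k hpre, if_pos hmem, ← hq]

-- ===== VERDICT (by name: the statement is the Claim_ definition above) =====
theorem solution_spec : Claim_equal_solution := by
  intro research n k _ hpre
  unfold Spec_solution
  have hpre' : 0 ≤ n := hpre
  -- B's fold step is pvStepSel of the pvWins scores
  have hstep : (fun (best : Option (Char × Int)) (a : Char) =>
      if decide (0 < (if n ≤ (research.length : Int) then
        ((PySem.List.pyRange 1 ((research.length : Int) - n + 1)).foldl
          (fun (st : Int × Int × Int) i =>
            (st.1 + (PySem.List.pyGetD (research.map (fun r => (PySem.Str.count r (String.ofList [a]) : Int))) (i + n - 1) 0 - PySem.List.pyGetD (research.map (fun r => (PySem.Str.count r (String.ofList [a]) : Int))) (i - 1) 0),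
             st.2.1 + ((if PySem.List.pyGetD (research.map (fun r => (PySem.Str.count r (String.ofList [a]) : Int))) (i + n - 1) 0 < k then (1 : Int) else 0)
               - (if PySem.List.pyGetD (research.map (fun r => (PySem.Str.count r (String.ofList [a]) : Int))) (i - 1) 0 < k then (1 : Int) else 0)),
             if 2 * n * k ≤ st.1 + (PySem.List.pyGetD (research.map (fun r => (PySem.Str.count r (String.ofList [a]) : Int))) (i + n - 1) 0 - PySem.List.pyGetD (research.map (fun r => (PySem.Str.count r (String.ofList [a]) : Int))) (i - 1) 0)
                ∧ st.2.1 + ((if PySem.List.pyGetD (research.map (fun r => (PySem.Str.count r (String.ofList [a]) : Int))) (i + n - 1) 0 < k then (1 : Int) else 0)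
                  - (if PySem.List.pyGetD (research.map (fun r => (PySem.Str.count r (String.ofList [a]) : Int))) (i - 1) 0 < k then (1 : Int) else 0)) = 0
             then st.2.2 + 1 else st.2.2))
          ((PySem.List.slice (research.map (fun r => (PySem.Str.count r (String.ofList [a]) : Int))) none (some n)).sum,
           ((PySem.List.slice (research.map (fun r => (PySem.Str.count r (String.ofList [a]) : Int))) none (some n)).countP (fun c => decide (c < k)) : Int),
           if 2 * n * k ≤ (PySem.List.slice (research.map (fun r => (PySem.Str.count r (String.ofList [a]) : Int))) none (some n)).sum
              ∧ ((PySem.List.slice (research.map (fun r => (PySem.Str.count r (String.ofList [a]) : Int))) none (some n)).countP (fun c => decide (c < k)) : Int) = 0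
           then (1 : Int) else 0)).2.2
      else 0))
          && (match best with | none => true | some b => decide (b.2 < (if n ≤ (research.length : Int) then
        ((PySem.List.pyRange 1 ((research.length : Int) - n + 1)).foldl
          (fun (st : Int × Int × Int) i =>
            (st.1 + (PySem.List.pyGetD (research.map (fun r => (PySem.Str.count r (String.ofList [a]) : Int))) (i + n - 1) 0 - PySem.List.pyGetD (research.map (fun r => (PySem.Str.count r (String.ofList [a]) : Int))) (i - 1) 0),
             st.2.1 + ((if PySem.List.pyGetD (research.map (fun r => (PySem.Str.count r (String.ofList [a]) : Int))) (i + n - 1) 0 < k then (1 : Int) else 0)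
               - (if PySem.List.pyGetD (research.map (fun r => (PySem.Str.count r (String.ofList [a]) : Int))) (i - 1) 0 < k then (1 : Int) else 0)),
             if 2 * n * k ≤ st.1 + (PySem.List.pyGetD (research.map (fun r => (PySem.Str.count r (String.ofList [a]) : Int))) (i + n - 1) 0 - PySem.List.pyGetD (research.map (fun r => (PySem.Str.count r (String.ofList [a]) : Int))) (i - 1) 0)
                ∧ st.2.1 + ((if PySem.List.pyGetD (research.map (fun r => (PySem.Str.count r (String.ofList [a]) : Int))) (i + n - 1) 0 < k then (1 : Int) else 0)
                  - (if PySem.List.pyGetD (research.map (fun r => (PySem.Str.count r (String.ofList [a]) : Int))) (i - 1) 0 < k then (1 : Int) else 0)) = 0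
             then st.2.2 + 1 else st.2.2))
          ((PySem.List.slice (research.map (fun r => (PySem.Str.count r (String.ofList [a]) : Int))) none (some n)).sum,
           ((PySem.List.slice (research.map (fun r => (PySem.Str.count r (String.ofList [a]) : Int))) none (some n)).countP (fun c => decide (c < k)) : Int),
           if 2 * n * k ≤ (PySem.List.slice (research.map (fun r => (PySem.Str.count r (String.ofList [a]) : Int))) none (some n)).sum
              ∧ ((PySem.List.slice (research.map (fun r => (PySem.Str.count r (String.ofList [a]) : Int))) none (some n)).countP (fun c => decide (c < k)) : Int) = 0
           then (1 : Int) else 0)).2.2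
      else 0))) then
        some (a, (if n ≤ (research.length : Int) then
        ((PySem.List.pyRange 1 ((research.length : Int) - n + 1)).foldl
          (fun (st : Int × Int × Int) i =>
            (st.1 + (PySem.List.pyGetD (research.map (fun r => (PySem.Str.count r (String.ofList [a]) : Int))) (i + n - 1) 0 - PySem.List.pyGetD (research.map (fun r => (PySem.Str.count r (String.ofList [a]) : Int))) (i - 1) 0),
             st.2.1 + ((if PySem.List.pyGetD (research.map (fun r => (PySem.Str.count r (String.ofList [a]) : Int))) (i + n - 1) 0 < k then (1 : Int) else 0)
               - (if PySem.List.pyGetD (research.map (fun r => (PySem.Str.count r (String.ofList [a]) : Int))) (i - 1) 0 < k then (1 : Int) else 0)),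
             if 2 * n * k ≤ st.1 + (PySem.List.pyGetD (research.map (fun r => (PySem.Str.count r (String.ofList [a]) : Int))) (i + n - 1) 0 - PySem.List.pyGetD (research.map (fun r => (PySem.Str.count r (String.ofList [a]) : Int))) (i - 1) 0)
                ∧ st.2.1 + ((if PySem.List.pyGetD (research.map (fun r => (PySem.Str.count r (String.ofList [a]) : Int))) (i + n - 1) 0 < k then (1 : Int) else 0)
                  - (if PySem.List.pyGetD (research.map (fun r => (PySem.Str.count r (String.ofList [a]) : Int))) (i - 1) 0 < k then (1 : Int) else 0)) = 0
             then st.2.2 + 1 else st.2.2))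
          ((PySem.List.slice (research.map (fun r => (PySem.Str.count r (String.ofList [a]) : Int))) none (some n)).sum,
           ((PySem.List.slice (research.map (fun r => (PySem.Str.count r (String.ofList [a]) : Int))) none (some n)).countP (fun c => decide (c < k)) : Int),
           if 2 * n * k ≤ (PySem.List.slice (research.map (fun r => (PySem.Str.count r (String.ofList [a]) : Int))) none (some n)).sum
              ∧ ((PySem.List.slice (research.map (fun r => (PySem.Str.count r (String.ofList [a]) : Int))) none (some n)).countP (fun c => decide (c < k)) : Int) = 0
           then (1 : Int) else 0)).2.2
      else 0))
      else best)
      = pvStepSel (fun a => pvWins (pvCnt research a) n k) := by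
    funext best a
    rw [pv_wins_eq (research.map (fun r => (PySem.Str.count r (String.ofList [a]) : Int))) (research.length : Int) n k (by simp) hpre']
    rfl
  have hB : solution_alt research n k
      = (match (pvAlphas research).foldl
          (pvStepSel (fun a => pvWins (pvCnt research a) n k)) none with
         | some b => String.ofList [b.1]
         | none => "None") := by
    rw [← hstep]
    rfl
  have hA : solution research n k
      = (match PySem.List.sorted2
          ((pvAnswer research n k).keys.foldl
            (fun l key => l ++ [(key, (pvAnswer research n k).getD key 0)]) [])
          (fun x => -x.2) (fun x => x.1) false with
         | x :: _ => String.ofList [x.1]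
         | [] => "None") := by
    rw [← pv_rawans research n k]
    rfl
  rw [PySem.List.foldl_append_singleton_eq_map, List.nil_append] at hA
  rw [hA, hB]
  obtain ⟨hnone, hsome⟩ := pv_sel_aux (fun a => pvWins (pvCnt research a) n k)
    (pvAlphas research) none (pv_alphas_sorted research) (by simp)
  cases hsel : (pvAlphas research).foldl
      (pvStepSel (fun a => pvWins (pvCnt research a) n k)) none with
  | none =>
    have hempty := (hnone hsel).2
    cases hsort : PySem.List.sorted2
        ((pvAnswer research n k).keys.map
          (fun key => (key, (pvAnswer research n k).getD key 0)))
        (fun x => -x.2) (fun x => x.1) false with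
    | nil => rfl
    | cons m rest =>
      exfalso
      have hm := (pv_sorted2_head hsort).1
      obtain ⟨hm1, hm2, _⟩ := (pv_LA_mem research n k hpre' m).mp hm
      exact hempty m.1 hm1 hm2
  | some p =>
    obtain ⟨C1, _, C3⟩ := hsome p hsel
    have hp : p.1 ∈ pvAlphas research ∧ p.2 = pvWins (pvCnt research p.1) n k ∧ 0 < p.2 := by
      rcases C1 with h1 | h1
      · exact absurd h1 (by simp)
      · exact h1
    have hppair : p = (p.1, pvWins (pvCnt research p.1) n k) :=
      Prod.ext rfl hp.2.1
    have hpLA : p ∈ (pvAnswer research n k).keys.map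
        (fun key => (key, (pvAnswer research n k).getD key 0)) := by
      rw [pv_LA_mem research n k hpre']
      exact ⟨hp.1, hp.2.1 ▸ hp.2.2, hppair⟩
    cases hsort : PySem.List.sorted2
        ((pvAnswer research n k).keys.map
          (fun key => (key, (pvAnswer research n k).getD key 0)))
        (fun x => -x.2) (fun x => x.1) false with
    | nil =>
      exfalso
      have : (pvAnswer research n k).keys.map
          (fun key => (key, (pvAnswer research n k).getD key 0)) = [] := pv_sorted2_nil hsort
      rw [this] at hpLA
      exact absurd hpLA (List.not_mem_nil)
    | cons m rest =>
      obtain ⟨hmLA, hmin⟩ := pv_sorted2_head hsort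
      obtain ⟨hm1, hm2, hm3⟩ := (pv_LA_mem research n k hpre' m).mp hmLA
      have hmp : m = p := by
        by_cases he : m = p
        · exact he
        · exfalso
          have hmne : (m.1, pvWins (pvCnt research m.1) n k) ≠ p := by
            rw [← hm3]
            exact he
          have h3 := C3 m.1 hm1 hm2 hmne
          rw [← hm3] at h3
          have h4 := hmin p hpLA
          rw [h3] at h4
          simp at h4
      rw [hmp]
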